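-- pv_equiv track=rewrite | github.com/Hwannni/Coding-Test | Level_0/Day6/Q2.py | solution
-- ===== SOURCE A (Python) =====
-- def solution(n, control):
--     dic = {
--         "w" : 1,
--         "s" : -1,
--         "d" : 10,
--         "a" : -10
--     }
--
--     for char in control:
--         if char in dic:
--             n += dic[char]
--
--     return n
-- ===== SOURCE B (Python) =====
-- def _disp(s):
--     # Displacement of a command string: divide and conquer over halves.
--     if len(s) == 0:
--         return 0
--     if len(s) == 1:
--         if s == "w":
--             return 1
--         if s == "s":
--             return -1
--         if s == "d":
--             return 10
--         if s == "a":
--             return -10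
--         return 0
--     m = len(s) // 2
--     return _disp(s[:m]) + _disp(s[m:])
--
-- def solution(n, control):
--     return n + _disp(control)
-- ===== Notes on version B (the rewrite author's own statement) =====
-- stated objective: alternative
-- what changed: Replaced the single accumulating loop over a dict of offsets by a recursive divide-and-conquer: the displacement of a command string is the sum of the displacements of its two halves, with single-character base cases decided by an if-chain; the result is n plus that displacement.
import Mathlib
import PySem

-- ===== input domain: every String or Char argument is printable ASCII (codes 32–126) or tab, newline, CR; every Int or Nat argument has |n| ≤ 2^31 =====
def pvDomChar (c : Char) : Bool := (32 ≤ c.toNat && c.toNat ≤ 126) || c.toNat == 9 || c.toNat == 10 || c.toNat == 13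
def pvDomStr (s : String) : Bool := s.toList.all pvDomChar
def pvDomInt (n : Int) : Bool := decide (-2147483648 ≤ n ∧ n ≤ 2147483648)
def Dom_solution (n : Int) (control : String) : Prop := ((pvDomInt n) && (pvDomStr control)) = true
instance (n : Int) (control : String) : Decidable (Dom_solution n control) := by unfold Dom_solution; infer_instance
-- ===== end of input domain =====

-- B replaces the dict-lookup accumulation loop by a divide-and-conquer recursion on string halves (alternative decomposition).

-- ===== PORT A =====
-- A's literal dict of control offsets.
def pvDic : PySem.Dict String Int :=
  ((((PySem.Dict.empty).insert "w" 1).insert "s" (-1)).insert "d" 10).insert "a" (-10)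

def solution (n : Int) (control : String) : Int :=
  -- 'for char in control: if char in dic: n += dic[char]'
  control.toList.foldl (fun acc char =>
    if pvDic.contains (String.ofList [char]) then
      acc + (pvDic.get? (String.ofList [char])).getD 0
    else acc) n

-- ===== PORT B =====
-- B's base case: the if-chain on a one-character string.
def pvOff (c : Char) : Int :=
  if c == 'w' then 1
  else if c == 's' then -1
  else if c == 'd' then 10
  else if c == 'a' then -10
  else 0

-- B's _disp: displacement by divide and conquer over halves.
def pvDisp : List Char → Int
  | [] => 0
  | [c] => pvOff c
  | c1 :: c2 :: rest =>
    let s := c1 :: c2 :: rest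
    let m := s.length / 2
    pvDisp (s.take m) + pvDisp (s.drop m)
termination_by s => s.length
decreasing_by
  · simp [List.length_take]; omega
  · simp [List.length_drop]; omega

def solution_alt (n : Int) (control : String) : Int :=
  n + pvDisp control.toList

-- ===== PRECONDITION & SPEC =====
def Spec_solution (n : Int) (control : String) (out : Int) : Prop := out = solution_alt n control
instance (n : Int) (control : String) (out : Int) : Decidable (Spec_solution n control out) := by unfold Spec_solution; infer_instance

-- ===== CLAIM (what is proved, stated in full; the proofs are below) =====
def Claim_equal_solution : Prop := ∀ (n : Int) (control : String), Dom_solution n control → Spec_solution n control (solution n control)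

-- ===== LEMMAS AND PROOFS =====

-- The dict lookup on a one-character string, characterised per character.
theorem pv_lookup (c : Char) :
    pvDic.get? (String.ofList [c]) =
      if c = 'w' then some 1 else if c = 's' then some (-1)
      else if c = 'd' then some 10 else if c = 'a' then some (-10) else none := by
  have hkey : ∀ d : Char, String.ofList [c] = String.ofList [d] ↔ c = d := by
    intro d
    constructor
    · intro h
      have := congrArg String.toList h
      simp [String.toList_ofList] at this
      exact this
    · intro h; rw [h]
  have ew : ("w" : String) = String.ofList ['w'] := rfl
  have es : ("s" : String) = String.ofList ['s'] := rfl
  have ed : ("d" : String) = String.ofList ['d'] := rfl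
  have ea : ("a" : String) = String.ofList ['a'] := rfl
  split_ifs with hw hs hd ha
  · subst hw; decide
  · subst hs; decide
  · subst hd; decide
  · subst ha; decide
  · simp only [pvDic, PySem.Dict.get?_insert, ew, es, ed, ea]
    rw [if_neg (fun h => ha ((hkey 'a').mp h)), if_neg (fun h => hd ((hkey 'd').mp h)),
        if_neg (fun h => hs ((hkey 's').mp h)), if_neg (fun h => hw ((hkey 'w').mp h))]
    simp [PySem.Dict.get?_empty]

-- A's loop body adds exactly pvOff c (0 for non-command characters).
theorem pv_stepA (acc : Int) (c : Char) :
    (if pvDic.contains (String.ofList [c]) then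
       acc + (pvDic.get? (String.ofList [c])).getD 0
     else acc) = acc + pvOff c := by
  rw [PySem.Dict.contains_eq_isSome_get?, pv_lookup c]
  unfold pvOff
  by_cases hw : c = 'w'
  · simp [hw]
  · by_cases hs : c = 's'
    · simp [hs]
    · by_cases hd : c = 'd'
      · simp [hd]
      · by_cases ha : c = 'a'
        · simp [ha]
        · simp [hw, hs, hd, ha]

-- A's fold is n plus the sum of per-character offsets.
theorem pv_foldA (cs : List Char) : ∀ n : Int,
    cs.foldl (fun acc char =>
      if pvDic.contains (String.ofList [char]) then
        acc + (pvDic.get? (String.ofList [char])).getD 0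
      else acc) n
    = n + (cs.map pvOff).sum := by
  induction cs with
  | nil => intro n; simp
  | cons c t ih =>
    intro n
    rw [List.foldl_cons, pv_stepA, ih]
    simp only [List.map_cons, List.sum_cons]
    ring

-- B's divide-and-conquer displacement equals the sum of per-character offsets.
theorem pv_disp_eq (s : List Char) : pvDisp s = (s.map pvOff).sum := by
  induction s using pvDisp.induct with
  | case1 => simp [pvDisp]
  | case2 c => rw [pvDisp, List.map_singleton, List.sum_singleton]
  | case3 c1 c2 rest s m ih1 ih2 =>
    rw [pvDisp, ih1, ih2, ← List.sum_append, ← List.map_append, List.take_append_drop]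

-- ===== VERDICT (by name: the statement is the Claim_ definition above) =====
theorem solution_spec : Claim_equal_solution := by
  intro n control _
  unfold Spec_solution solution solution_alt
  rw [pv_foldA, pv_disp_eq]
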